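-- pv_equiv track=rewrite | github.com/janwilmans/crashdumper | dump.py | filterUnhandledException
-- ===== SOURCE A (Python) =====
-- def wipeLinesInclusive(content, needle):
--     lineNr = 0
--     for line in content:
--         lineNr = lineNr + 1
--         if needle in line:
--             break
--     return content[lineNr:]
--
-- def isBlank(str):
--     return not (str and str.strip())
--
-- def filterUnhandledException(content):
--     t1 = wipeLinesInclusive(content, "STACK_TEXT:")
--     result = []
--     for line in t1:
--         if isBlank(line):
--             break
--         result += [line]
--     return result
-- ===== SOURCE B (Python) =====
-- def isBlank(str):
--     return not (str and str.strip())
--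
-- def filterUnhandledException(content):
--     # single-pass state machine: no slicing, no helper pre-pass
--     collecting = False
--     result = []
--     for line in content:
--         if collecting:
--             if isBlank(line):
--                 break
--             result.append(line)
--         elif "STACK_TEXT:" in line:
--             collecting = True
--     return result
-- ===== Notes on version B (the rewrite author's own statement) =====
-- stated objective: simpler
-- what changed: Replaced A's two-phase design (helper that scans for the marker and slices the list, then a second loop collecting until a blank line) by one single-pass loop over content with a boolean 'collecting' flag and no intermediate slice.
import Mathlib
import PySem

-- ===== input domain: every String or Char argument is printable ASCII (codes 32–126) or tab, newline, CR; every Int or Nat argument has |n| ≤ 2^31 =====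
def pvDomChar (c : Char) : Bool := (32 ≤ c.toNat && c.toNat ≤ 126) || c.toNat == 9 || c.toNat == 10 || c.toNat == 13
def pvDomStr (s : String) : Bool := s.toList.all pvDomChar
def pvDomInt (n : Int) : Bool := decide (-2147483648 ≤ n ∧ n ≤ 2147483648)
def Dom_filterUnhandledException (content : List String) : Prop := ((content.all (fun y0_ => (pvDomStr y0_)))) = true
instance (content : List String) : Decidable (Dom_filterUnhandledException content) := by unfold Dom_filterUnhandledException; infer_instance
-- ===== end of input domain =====

-- B replaces A's two-phase marker-scan-then-slice-then-collect by one single-pass loop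
-- with a boolean flag (objective: simpler); same return value on every list of strings.

-- ===== PORT A =====
-- loop of wipeLinesInclusive: lineNr += 1 first, break when needle is in the line
def pvWipeAux (needle : String) : List String → Int → Int
  | [], lineNr => lineNr
  | line :: rest, lineNr =>
      if PySem.Str.isIn needle line then lineNr + 1 else pvWipeAux needle rest (lineNr + 1)

def wipeLinesInclusive (content : List String) (needle : String) : List String :=
  PySem.List.slice content (some (pvWipeAux needle content 0)) none

def isBlank (s : String) : Bool :=
  -- not (str and str.strip()): true iff s is empty or s.strip() is empty
  !(PySem.Str.len s != 0 && PySem.Str.len (PySem.Str.strip s) != 0)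

-- second loop of A: collect lines until a blank one
def pvTakeLoop : List String → List String → List String
  | [], result => result
  | line :: rest, result =>
      if isBlank line then result else pvTakeLoop rest (result ++ [line])

def filterUnhandledException (content : List String) : List String :=
  pvTakeLoop (wipeLinesInclusive content "STACK_TEXT:") []

-- ===== PORT B =====
-- single loop with the 'collecting' flag, exactly as in Source B
def pvAltLoop : List String → Bool → List String → List String
  | [], _, result => result
  | line :: rest, collecting, result =>
      if collecting then
        if isBlank line then result else pvAltLoop rest collecting (result ++ [line])
      else
        pvAltLoop rest (PySem.Str.isIn "STACK_TEXT:" line) result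

def filterUnhandledException_alt (content : List String) : List String :=
  pvAltLoop content false []

-- ===== PRECONDITION & SPEC =====
def Spec_filterUnhandledException (content : List String) (out : List String) : Prop := out = filterUnhandledException_alt content
instance (content : List String) (out : List String) : Decidable (Spec_filterUnhandledException content out) := by unfold Spec_filterUnhandledException; infer_instance

-- ===== CLAIM (what is proved, stated in full; the proofs are below) =====
def Claim_equal_filterUnhandledException : Prop := ∀ (content : List String), Dom_filterUnhandledException content → Spec_filterUnhandledException content (filterUnhandledException content)

-- ===== LEMMAS AND PROOFS =====

theorem pvWipeAux_shift (needle : String) (xs : List String) (n : Int) :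
    pvWipeAux needle xs (n + 1) = pvWipeAux needle xs n + 1 := by
  induction xs generalizing n with
  | nil => rfl
  | cons l ls ih =>
      simp only [pvWipeAux]
      split_ifs <;> simp [ih]

theorem pvWipeAux_nonneg (needle : String) (xs : List String) (n : Int) (h : 0 ≤ n) :
    0 ≤ pvWipeAux needle xs n := by
  induction xs generalizing n with
  | nil => exact h
  | cons l ls ih =>
      simp only [pvWipeAux]
      split_ifs <;> [omega; exact ih _ (by omega)]

-- once the flag is true, B's loop is exactly A's collecting loop
theorem pvAltLoop_true (xs res : List String) :
    pvAltLoop xs true res = pvTakeLoop xs res := by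
  induction xs generalizing res with
  | nil => rfl
  | cons l ls ih =>
      simp only [pvAltLoop, pvTakeLoop, if_true]
      split_ifs <;> simp [ih]

theorem pv_main (content : List String) :
    pvAltLoop content false [] = filterUnhandledException content := by
  induction content with
  | nil => rfl
  | cons l ls ih =>
      simp only [pvAltLoop, Bool.false_eq_true, if_false]
      by_cases h : PySem.Str.isIn "STACK_TEXT:" l = true
      · rw [h, pvAltLoop_true]
        simp only [filterUnhandledException, wipeLinesInclusive, pvWipeAux, h, if_true]
        rw [PySem.List.slice_from _ (by omega)]
        rfl
      · rw [Bool.not_eq_true] at h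
        rw [h, ih]
        simp only [filterUnhandledException, wipeLinesInclusive, pvWipeAux, h]
        rw [if_neg (by simp), pvWipeAux_shift]
        have hn : 0 ≤ pvWipeAux "STACK_TEXT:" ls 0 := pvWipeAux_nonneg _ _ _ le_rfl
        rw [PySem.List.slice_from _ (by omega : (0:Int) ≤ pvWipeAux "STACK_TEXT:" ls 0 + 1)]
        have : (pvWipeAux "STACK_TEXT:" ls 0 + 1).toNat = (pvWipeAux "STACK_TEXT:" ls 0).toNat + 1 := by omega
        rw [this, PySem.List.slice_from _ hn, List.drop_succ_cons]

-- ===== VERDICT (by name: the statement is the Claim_ definition above) =====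
theorem filterUnhandledException_spec : Claim_equal_filterUnhandledException := by
  intro content _
  unfold Spec_filterUnhandledException filterUnhandledException_alt
  exact (pv_main content).symm
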